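-- pv_equiv track=rewrite | github.com/podateK/Warehouse-Managment-Systen | tools/route_logger.py | sequence_indices_from_canvas
-- ===== SOURCE A (Python) =====
-- def sequence_indices_from_canvas(points, connections, start_name=None):
--     """Return list of indices visited following first-outgoing edges (like sequence_from_canvas but indices)."""
--     names = []
--     for i, p in enumerate(points):
--         raw = (p.get('name') or '').strip()
--         if not raw:
--             names.append(f'#${i}')
--         else:
--             names.append(raw)
--
--     adj = {}
--     for s, d in connections:
--         if 0 <= s < len(names) and 0 <= d < len(names):
--             adj.setdefault(s, []).append(d)
--
--     start_idx = None
--     if start_name: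
--         try:
--             start_idx = names.index(start_name)
--         except ValueError:
--             start_idx = None
--     if start_idx is None:
--         if 'H1' in names:
--             start_idx = names.index('H1')
--         else:
--             start_idx = 0 if names else None
--
--     if start_idx is None:
--         return []
--
--     seq = []
--     visited = set()
--     cur = start_idx
--     while cur is not None and cur not in visited:
--         seq.append(cur)
--         visited.add(cur)
--         outs = [dst for dst in adj.get(cur, []) if dst not in visited]
--         cur = outs[0] if outs else None
--
--     return seq
-- ===== SOURCE B (Python) =====
-- def _names(points, i=0):
--     """Recursively build the display names list."""
--     if not points:
--         return []
--     raw = (points[0].get('name') or '').strip()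
--     return [raw if raw else f'#${i}'] + _names(points[1:], i + 1)
--
--
-- def _start(names, start_name):
--     """First candidate (start_name if truthy, then 'H1') present in names, else 0/None."""
--     for cand in ([start_name] if start_name else []) + ['H1']:
--         if cand in names:
--             return names.index(cand)
--     return 0 if names else None
--
--
-- def _walk(connections, n, visited, cur):
--     """Return the path from cur, built front-to-back by recursion; visited is the
--     list of already-emitted indices."""
--     if cur in visited:
--         return []
--     vis2 = visited + [cur]
--     nxt = next((d for s, d in connections
--                 if s == cur and 0 <= d < n and d not in vis2), None)
--     return [cur] if nxt is None else [cur] + _walk(connections, n, vis2, nxt)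
--
--
-- def sequence_indices_from_canvas(points, connections, start_name=None):
--     """Recursive walk over the raw connection list (no adjacency dict)."""
--     names = _names(points)
--     start = _start(names, start_name)
--     return [] if start is None else _walk(connections, len(names), [], start)
-- ===== Notes on version B (the rewrite author's own statement) =====
-- stated objective: alternative
-- what changed: B replaces A's adjacency-dict build plus accumulator while-loop by a recursive decomposition: names built by structural recursion, the start index resolved by scanning a candidate list, and the walk written as a front-to-back recursion that picks the first eligible edge directly from the raw connections list (no dict).
import Mathlib
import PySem

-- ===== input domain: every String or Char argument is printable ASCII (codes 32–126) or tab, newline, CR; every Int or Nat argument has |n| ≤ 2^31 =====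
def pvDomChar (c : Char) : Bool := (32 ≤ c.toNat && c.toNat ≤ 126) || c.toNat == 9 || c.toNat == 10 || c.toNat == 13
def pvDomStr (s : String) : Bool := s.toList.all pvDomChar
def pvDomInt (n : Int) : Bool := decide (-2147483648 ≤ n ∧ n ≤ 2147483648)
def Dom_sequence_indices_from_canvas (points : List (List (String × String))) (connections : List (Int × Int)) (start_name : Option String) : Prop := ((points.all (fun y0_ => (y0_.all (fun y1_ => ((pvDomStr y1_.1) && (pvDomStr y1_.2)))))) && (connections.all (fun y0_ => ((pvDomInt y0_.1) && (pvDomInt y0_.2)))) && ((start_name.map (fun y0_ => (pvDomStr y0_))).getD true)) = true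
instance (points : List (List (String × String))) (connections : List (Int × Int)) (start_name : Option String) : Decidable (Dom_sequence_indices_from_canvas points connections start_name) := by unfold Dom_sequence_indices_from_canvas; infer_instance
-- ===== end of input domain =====

-- B replaces A's adjacency-dict + accumulator while-loop by recursive helpers: names by
-- structural recursion, start index from a candidate list, and a front-to-back recursive
-- walk that scans the raw connections list; same results, no dict ("alternative").

-- ===== PORT A =====

-- names list: A appends inside a for-loop over enumerate(points)
def pvNamesA (points : List (List (String × String))) : List String :=
  (PySem.List.enumerate points).foldl (fun names ip =>
    let raw := PySem.Str.strip ((PySem.Dict.mk ip.2).getD "name" "")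
    if raw = "" then names ++ ["#$" ++ PySem.Int.toStr ip.1] else names ++ [raw]) []

-- adjacency dict: adj.setdefault(s, []).append(d)  =  adj[s] = adj.get(s, []) + [d]
def pvAdj (connections : List (Int × Int)) (n : Int) : PySem.Dict Int (List Int) :=
  connections.foldl (fun adj sd =>
    if 0 ≤ sd.1 ∧ sd.1 < n ∧ 0 ≤ sd.2 ∧ sd.2 < n then
      adj.modify sd.1 [] (· ++ [sd.2])
    else adj) PySem.Dict.empty

-- A's start-index resolution: pvS0 is the try/except block (None unless start_name is
-- truthy and found), then the H1 / first-index fallbacks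
def pvS0 (names : List String) (start_name : Option String) : Option Int :=
  match start_name with
  | some s => if s = "" then none else (PySem.List.index? names s).map Int.ofNat
  | none => none

def pvStartIdx (names : List String) (start_name : Option String) : Option Int :=
  match pvS0 names start_name with
  | some i => some i
  | none =>
    if names.contains "H1" then (PySem.List.index? names "H1").map Int.ofNat
    else if names = [] then none else some 0

-- A's while-loop (fuel = names.length + 1 covers every iteration the Python performs:
-- each pass adds a fresh element of [0, n) to visited)
def pvLoopA (adj : PySem.Dict Int (List Int)) : Nat → List Int → PySem.Set Int → Option Int → List Int
  | 0, seq, _, _ => seq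
  | fuel + 1, seq, visited, cur =>
    match cur with
    | none => seq
    | some c =>
      if PySem.Set.contains visited c then seq
      else
        let visited' := PySem.Set.add visited c
        let outs := (adj.getD c []).filter (fun d => !PySem.Set.contains visited' d)
        pvLoopA adj fuel (seq ++ [c]) visited' outs.head?

def sequence_indices_from_canvas (points : List (List (String × String))) (connections : List (Int × Int)) (start_name : Option String) : List Int :=
  let names := pvNamesA points
  let adj := pvAdj connections (names.length : Int)
  match pvStartIdx names start_name with
  | none => []
  | some st => pvLoopA adj (names.length + 1) [] PySem.Set.empty (some st)

-- ===== PORT B =====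

-- _names: structural recursion with an index counter
def pvNamesB : List (List (String × String)) → Int → List String
  | [], _ => []
  | p :: rest, i =>
    let raw := PySem.Str.strip ((PySem.Dict.mk p).getD "name" "")
    (if raw ≠ "" then raw else "#$" ++ PySem.Int.toStr i) :: pvNamesB rest (i + 1)

-- _start: the candidate list [start_name?, 'H1'], then the 0/None fallback
def pvCands (start_name : Option String) : List String :=
  (match start_name with
   | some s => if s = "" then [] else [s]
   | none => []) ++ ["H1"]

def pvFindCand (names : List String) : List String → Option Int
  | [] => if names.isEmpty then none else some 0
  | c :: cs =>
    match PySem.List.index? names c with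
    | some k => some (Int.ofNat k)
    | none => pvFindCand names cs

-- _walk: front-to-back recursion over the raw connections list; visited is the list of
-- already-emitted indices (fuel = n + 1 bounds the recursion depth, see the top level)
def pvWalkB (connections : List (Int × Int)) (n : Int) : Nat → List Int → Int → List Int
  | 0, _, _ => []
  | fuel + 1, visited, cur =>
    if visited.contains cur then []
    else
      let vis2 := visited ++ [cur]
      match (connections.find? (fun sd =>
          sd.1 == cur && decide (0 ≤ sd.2) && decide (sd.2 < n) && !vis2.contains sd.2)).map (·.2) with
      | none => [cur]
      | some nxt => cur :: pvWalkB connections n fuel vis2 nxt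

def sequence_indices_from_canvas_alt (points : List (List (String × String))) (connections : List (Int × Int)) (start_name : Option String) : List Int :=
  let names := pvNamesB points 0
  match pvFindCand names (pvCands start_name) with
  | none => []
  | some st => pvWalkB connections (names.length : Int) (names.length + 1) [] st

-- ===== PRECONDITION & SPEC =====
def Spec_sequence_indices_from_canvas (points : List (List (String × String))) (connections : List (Int × Int)) (start_name : Option String) (out : List Int) : Prop := out = sequence_indices_from_canvas_alt points connections start_name
instance (points : List (List (String × String))) (connections : List (Int × Int)) (start_name : Option String) (out : List Int) : Decidable (Spec_sequence_indices_from_canvas points connections start_name out) := by unfold Spec_sequence_indices_from_canvas; infer_instance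

-- ===== CLAIM (what is proved, stated in full; the proofs are below) =====
def Claim_equal_sequence_indices_from_canvas : Prop := ∀ (points : List (List (String × String))) (connections : List (Int × Int)) (start_name : Option String), Dom_sequence_indices_from_canvas points connections start_name → Spec_sequence_indices_from_canvas points connections start_name (sequence_indices_from_canvas points connections start_name)

-- ===== LEMMAS AND PROOFS =====

theorem pvNamesB_eq_enum (points : List (List (String × String))) : ∀ (i : Int),
    pvNamesB points i = (PySem.List.enumerate points i).map (fun ip =>
      let raw := PySem.Str.strip ((PySem.Dict.mk ip.2).getD "name" "")
      if raw = "" then "#$" ++ PySem.Int.toStr ip.1 else raw) := by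
  induction points with
  | nil => intro i; simp [pvNamesB, PySem.List.enumerate_nil]
  | cons p rest ih =>
    intro i
    have hstep : pvNamesB (p :: rest) i
        = (if PySem.Str.strip ((PySem.Dict.mk p).getD "name" "") ≠ "" then
            PySem.Str.strip ((PySem.Dict.mk p).getD "name" "")
          else "#$" ++ PySem.Int.toStr i) :: pvNamesB rest (i + 1) := rfl
    rw [hstep, PySem.List.enumerate_cons, List.map_cons, ← ih]
    by_cases h : PySem.Str.strip ((PySem.Dict.mk p).getD "name" "") = "" <;> simp [h]

theorem pvNamesA_eq_B (points : List (List (String × String))) : pvNamesA points = pvNamesB points 0 := by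
  unfold pvNamesA
  have hfun : (fun (names : List String) (ip : Int × List (String × String)) =>
      let raw := PySem.Str.strip ((PySem.Dict.mk ip.2).getD "name" "")
      if raw = "" then names ++ ["#$" ++ PySem.Int.toStr ip.1] else names ++ [raw])
    = (fun names ip => names ++
        [(fun (ip : Int × List (String × String)) =>
          let raw := PySem.Str.strip ((PySem.Dict.mk ip.2).getD "name" "")
          if raw = "" then "#$" ++ PySem.Int.toStr ip.1 else raw) ip]) := by
    funext names ip
    by_cases h : PySem.Str.strip ((PySem.Dict.mk ip.2).getD "name" "") = "" <;> simp [h]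
  rw [hfun, PySem.List.foldl_append_singleton_eq_map, pvNamesB_eq_enum]
  simp

theorem pvStart_eq (names : List String) (start_name : Option String) :
    pvStartIdx names start_name = pvFindCand names (pvCands start_name) := by
  have hH1 : ((if names.contains "H1" then (PySem.List.index? names "H1").map Int.ofNat
      else if names = [] then none else some 0))
      = pvFindCand names ["H1"] := by
    unfold pvFindCand
    cases hidx : PySem.List.index? names "H1" with
    | some k =>
      have hmem : "H1" ∈ names := by
        by_contra hm
        rw [PySem.List.index?, List.idxOf?_eq_none_iff.mpr hm] at hidx
        cases hidx
      rw [if_pos (by simpa using hmem)]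
      simp
    | none =>
      have hmem : "H1" ∉ names := List.idxOf?_eq_none_iff.mp hidx
      rw [if_neg (by simpa using hmem)]
      unfold pvFindCand
      by_cases hne : names = []
      · simp [hne]
      · simp [hne, List.isEmpty_iff]
  cases start_name with
  | none => simpa [pvStartIdx, pvS0, pvCands] using hH1
  | some s =>
    by_cases hes : s = ""
    · simpa [pvStartIdx, pvS0, pvCands, hes] using hH1
    · cases hidx : PySem.List.index? names s with
      | some k =>
        rw [PySem.List.index?] at hidx
        simp [pvStartIdx, pvS0, pvCands, hes, hidx, pvFindCand]
      | none =>
        rw [PySem.List.index?] at hidx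
        simpa [pvStartIdx, pvS0, pvCands, hes, hidx, pvFindCand] using hH1

theorem pvAdj_getD (connections : List (Int × Int)) (n : Int) (c : Int) (adj : PySem.Dict Int (List Int)) :
    (connections.foldl (fun adj sd =>
      if 0 ≤ sd.1 ∧ sd.1 < n ∧ 0 ≤ sd.2 ∧ sd.2 < n then adj.modify sd.1 [] (· ++ [sd.2]) else adj) adj).getD c []
    = adj.getD c [] ++ (connections.filter (fun sd =>
        decide (0 ≤ sd.1 ∧ sd.1 < n ∧ 0 ≤ sd.2 ∧ sd.2 < n) && (sd.1 == c))).map (·.2) := by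
  induction connections generalizing adj with
  | nil => simp
  | cons sd rest ih =>
    simp only [List.foldl_cons, List.filter_cons]
    by_cases hb : 0 ≤ sd.1 ∧ sd.1 < n ∧ 0 ≤ sd.2 ∧ sd.2 < n
    · by_cases hc : sd.1 = c
      · subst hc
        simp [hb, ih, PySem.Dict.getD_modify_self]
      · simp [hb, hc, ih, PySem.Dict.getD_modify_of_ne _ _ _ (Ne.symm hc)]
    · simp [hb, ih]

-- one step of the walk: first unvisited neighbour from A's dict = first eligible raw edge
theorem pvStep_eq (connections : List (Int × Int)) (n c : Int) (vis : List Int)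
    (hc : 0 ≤ c ∧ c < n) :
    (((pvAdj connections n).getD c []).filter (fun d => !vis.contains d)).head?
    = (connections.find? (fun sd =>
        sd.1 == c && decide (0 ≤ sd.2) && decide (sd.2 < n) && !vis.contains sd.2)).map (·.2) := by
  unfold pvAdj
  rw [pvAdj_getD, PySem.Dict.getD_of_not_contains _ _ rfl, List.nil_append]
  induction connections with
  | nil => rfl
  | cons sd rest ih =>
    simp only [List.filter_cons, List.find?_cons]
    by_cases h1 : sd.1 = c
    · by_cases hb2 : 0 ≤ sd.2 ∧ sd.2 < n
      · have hP : (decide (0 ≤ sd.1 ∧ sd.1 < n ∧ 0 ≤ sd.2 ∧ sd.2 < n) && (sd.1 == c)) = true := by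
          simp [h1, hc.1, hc.2, hb2.1, hb2.2]
        rw [hP]
        by_cases hv : vis.contains sd.2 = true
        · have hv' : sd.2 ∈ vis := by simpa using hv
          have hQ : (sd.1 == c && decide (0 ≤ sd.2) && decide (sd.2 < n) && !vis.contains sd.2) = false := by
            simp [hv']
          rw [hQ, if_pos rfl, List.map_cons, List.filter_cons]
          have hu : (!vis.contains sd.2) = false := by simp [hv']
          rw [hu, if_neg (by simp)]
          exact ih
        · have hv' : sd.2 ∉ vis := by simpa using hv
          have hQ : (sd.1 == c && decide (0 ≤ sd.2) && decide (sd.2 < n) && !vis.contains sd.2) = true := by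
            simp [h1, hb2.1, hb2.2, hv']
          rw [hQ, if_pos rfl, List.map_cons, List.filter_cons]
          have hu : (!vis.contains sd.2) = true := by simp [hv']
          rw [hu, if_pos rfl]
          simp
      · have hP : (decide (0 ≤ sd.1 ∧ sd.1 < n ∧ 0 ≤ sd.2 ∧ sd.2 < n) && (sd.1 == c)) = false := by
          simp only [Bool.and_eq_false_iff, decide_eq_false_iff_not]
          left; rintro ⟨-, -, h3, h4⟩; exact hb2 ⟨h3, h4⟩
        have hQ : (sd.1 == c && decide (0 ≤ sd.2) && decide (sd.2 < n) && !vis.contains sd.2) = false := by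
          rcases (by omega : ¬(0 ≤ sd.2) ∨ ¬(sd.2 < n)) with h | h <;> simp [h]
        rw [hP, hQ, if_neg (by simp)]
        exact ih
    · have hP : (decide (0 ≤ sd.1 ∧ sd.1 < n ∧ 0 ≤ sd.2 ∧ sd.2 < n) && (sd.1 == c)) = false := by simp [h1]
      have hQ : (sd.1 == c && decide (0 ≤ sd.2) && decide (sd.2 < n) && !vis.contains sd.2) = false := by simp [h1]
      rw [hP, hQ, if_neg (by simp)]
      exact ih

theorem pvLoopA_none (adj : PySem.Dict Int (List Int)) (fuel : Nat) (seq : List Int) (vis : PySem.Set Int) :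
    pvLoopA adj fuel seq vis none = seq := by
  cases fuel <;> rfl

-- A's accumulator loop equals seq ++ B's cons-built walk (visited sets coincide as lists,
-- since Set.add on a fresh element is exactly ++ [c]); cur stays a valid index
theorem pvLoop_eq (connections : List (Int × Int)) (n : Int) (fuel : Nat) :
    ∀ (seq : List Int) (vis : List Int) (c : Int), (0 ≤ c ∧ c < n) →
    pvLoopA (pvAdj connections n) fuel seq vis (some c)
      = seq ++ pvWalkB connections n fuel vis c := by
  induction fuel with
  | zero => intro seq vis c _; simp [pvLoopA, pvWalkB]
  | succ fuel ih =>
    intro seq vis c hc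
    simp only [pvLoopA, pvWalkB]
    by_cases hv : List.contains vis c = true
    · rw [if_pos (by exact hv), if_pos hv]
      try simp
    · rw [if_neg (by exact hv), if_neg hv]
      have hadd : PySem.Set.add vis c = vis ++ [c] := by
        unfold PySem.Set.add; rw [if_neg (by exact hv)]
      rw [hadd]
      have hstep := pvStep_eq connections n c (vis ++ [c]) hc
      rw [show (fun d => !PySem.Set.contains (vis ++ [c]) d) = (fun d => !(vis ++ [c]).contains d) from rfl, hstep]
      cases hfind : (connections.find? (fun sd =>
          sd.1 == c && decide (0 ≤ sd.2) && decide (sd.2 < n) && !(vis ++ [c]).contains sd.2)).map (·.2) with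
      | none => rw [pvLoopA_none]
      | some d =>
        have hd : 0 ≤ d ∧ d < n := by
          rcases Option.map_eq_some_iff.mp hfind with ⟨sd, hf, hsnd⟩
          have hq := List.find?_some hf
          simp only [Bool.and_eq_true, decide_eq_true_eq] at hq
          exact hsnd ▸ ⟨hq.1.1.2, hq.1.2⟩
        rw [ih (seq ++ [c]) (vis ++ [c]) d hd]
        simp

theorem pvStartIdx_valid (names : List String) (start_name : Option String) (st : Int)
    (h : pvStartIdx names start_name = some st) : 0 ≤ st ∧ st < (names.length : Int) := by
  have key : ∀ (x : String) (st : Int), (PySem.List.index? names x).map Int.ofNat = some st →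
      0 ≤ st ∧ st < (names.length : Int) := by
    intro x st h
    cases hidx : PySem.List.index? names x with
    | none => rw [hidx] at h; simp at h
    | some k =>
      rw [hidx] at h
      simp only [Option.map_some, Option.some.injEq, Int.ofNat_eq_natCast] at h
      obtain ⟨hlt, -, -⟩ := PySem.List.getElem_of_index?_eq_some hidx
      omega
  unfold pvStartIdx at h
  cases hs0 : pvS0 names start_name with
  | some i =>
    rw [hs0] at h
    obtain rfl : i = st := Option.some.inj h
    unfold pvS0 at hs0
    cases start_name with
    | none => simp at hs0
    | some s =>
      dsimp only at hs0
      by_cases hes : s = ""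
      · rw [if_pos hes] at hs0; simp at hs0
      · rw [if_neg hes] at hs0; exact key s i hs0
  | none =>
    rw [hs0] at h
    by_cases hh : names.contains "H1" = true
    · rw [if_pos hh] at h; exact key "H1" st h
    · rw [if_neg hh] at h
      by_cases hne : names = []
      · rw [if_pos hne] at h; simp at h
      · rw [if_neg hne] at h
        obtain rfl : (0 : Int) = st := Option.some.inj h
        have : 0 < names.length := List.length_pos_iff.mpr hne
        exact ⟨le_refl 0, by exact_mod_cast this⟩

-- ===== VERDICT (by name: the statement is the Claim_ definition above) =====
theorem sequence_indices_from_canvas_spec : Claim_equal_sequence_indices_from_canvas := by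
  intro points connections start_name _
  unfold Spec_sequence_indices_from_canvas
  unfold sequence_indices_from_canvas sequence_indices_from_canvas_alt
  simp only [pvNamesA_eq_B, pvStart_eq]
  cases hst : pvFindCand (pvNamesB points 0) (pvCands start_name) with
  | none => rfl
  | some st =>
    have hvalid : 0 ≤ st ∧ st < ((pvNamesB points 0).length : Int) :=
      pvStartIdx_valid _ start_name st (by rw [pvStart_eq]; exact hst)
    simpa using pvLoop_eq connections _ _ [] [] st hvalid
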